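-- pv_equiv track=rewrite | github.com/AlexShoWhitehead/math583-project | data_parser.py | html_statement_windows
-- ===== SOURCE A (Python) =====
-- from typing import Dict, List, Optional, Tuple
--
-- def html_statement_windows(html: str, anchors: List[str], window_chars: int = 250_000) -> List[str]:
--     lo = html.lower()
--     windows: List[str] = []
--     for a in anchors:
--         idx = lo.find(a)
--         if idx != -1:
--             start = max(0, idx - window_chars // 3)
--             end = min(len(html), idx + window_chars)
--             windows.append(html[start:end])
--     return windows
-- ===== SOURCE B (Python) =====
-- from typing import List
--
-- def html_statement_windows(html: str, anchors: List[str], window_chars: int = 250_000) -> List[str]: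
--     lo = html.lower()
--     # phase 1: index the distinct anchors by their first character (one bucket dict);
--     # an empty anchor is found at 0 immediately.
--     first = {}
--     buckets = {}
--     for a in dict.fromkeys(anchors):
--         if a == "":
--             first[a] = 0
--         else:
--             buckets.setdefault(a[0], []).append(a)
--     # phase 2: one left-to-right sweep over the text; at each position only the
--     # bucket of anchors starting with that character is examined.
--     for i in range(len(lo)):
--         for a in buckets.get(lo[i], []):
--             if a not in first and lo.startswith(a, i):
--                 first[a] = i
--     # phase 3: emit the windows in anchor order.
--     windows = []
--     for a in anchors:
--         if a in first:
--             idx = first[a]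
--             start = max(0, idx - window_chars // 3)
--             end = min(len(html), idx + window_chars)
--             windows.append(html[start:end])
--     return windows
-- ===== Notes on version B (the rewrite author's own statement) =====
-- stated objective: alternative
-- what changed: B replaces A's per-anchor lo.find scan by one left-to-right sweep over the lowered text, with the distinct anchors bucketed by first character and each anchor's first match recorded in a dict during the sweep; windows are then emitted in anchor order (duplicate anchors are searched only once).
import Mathlib
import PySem

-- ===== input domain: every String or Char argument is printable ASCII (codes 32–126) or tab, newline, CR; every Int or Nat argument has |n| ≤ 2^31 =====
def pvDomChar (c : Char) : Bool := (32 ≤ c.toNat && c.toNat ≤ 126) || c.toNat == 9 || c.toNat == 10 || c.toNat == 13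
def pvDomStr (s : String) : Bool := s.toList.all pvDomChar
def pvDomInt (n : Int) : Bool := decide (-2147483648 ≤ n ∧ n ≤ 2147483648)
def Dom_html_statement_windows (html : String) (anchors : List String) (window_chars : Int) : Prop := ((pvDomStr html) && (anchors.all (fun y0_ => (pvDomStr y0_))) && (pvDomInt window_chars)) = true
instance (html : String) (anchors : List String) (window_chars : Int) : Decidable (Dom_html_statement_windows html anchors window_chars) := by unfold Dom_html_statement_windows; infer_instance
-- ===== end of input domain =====

-- B replaces A's per-anchor scan of the text by one position-major sweep with the distinct
-- anchors bucketed by first character (objective: alternative; return values proved equal).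

-- ===== PORT A =====
def html_statement_windows (html : String) (anchors : List String) (window_chars : Int) : List String :=
  let lo := PySem.Str.lower html
  anchors.foldl (fun windows a =>
    let idx := PySem.Str.find lo a
    if idx ≠ -1 then
      windows ++ [PySem.Str.slice html
        (some (max 0 (idx - PySem.Int.floordiv window_chars 3)))
        (some (min (PySem.Str.len html) (idx + window_chars)))]
    else windows) []

-- ===== PORT B =====
-- phase 1 of Source B: first occurrences dict seeded with empty anchors, and the distinct
-- nonempty anchors bucketed by their first character (a[0] ported as headD, exact for a ≠ "")
def pvPhase1 (l : List String) : PySem.Dict String Int × PySem.Dict Char (List String) :=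
  l.foldl (fun fb a =>
    if a = "" then (fb.1.insert a 0, fb.2)
    else (fb.1, fb.2.modify (a.toList.headD ' ') [] (· ++ [a]))) (PySem.Dict.empty, PySem.Dict.empty)

-- body of phase 2's inner loop: 'if a not in first and lo.startswith(a, i): first[a] = i'
-- (lo.startswith(a, i) ported as startswith on drop i, exact for 0 ≤ i ≤ len(lo))
def pvBucketStep (cl : List Char) (i : Nat) (first : PySem.Dict String Int) (a : String) :
    PySem.Dict String Int :=
  if !first.contains a && PySem.Chars.startswith (cl.drop i) a.toList then
    first.insert a (i : Int)
  else first

def html_statement_windows_alt (html : String) (anchors : List String) (window_chars : Int) : List String :=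
  let lo := PySem.Str.lower html
  let cl := lo.toList
  let fb := pvPhase1 (PySem.List.dedup anchors)   -- 'for a in dict.fromkeys(anchors)'
  -- phase 2: 'for i in range(len(lo)): for a in buckets.get(lo[i], []): …'
  let first := (List.range cl.length).foldl
    (fun first i => (fb.2.getD (cl.getD i ' ') []).foldl (pvBucketStep cl i) first) fb.1
  -- phase 3: emit the windows in anchor order
  anchors.foldl (fun windows a =>
    match first.get? a with
    | some idx =>
        windows ++ [PySem.Str.slice html
          (some (max 0 (idx - PySem.Int.floordiv window_chars 3)))
          (some (min (PySem.Str.len html) (idx + window_chars)))]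
    | none => windows) []

-- ===== PRECONDITION & SPEC =====
def Spec_html_statement_windows (html : String) (anchors : List String) (window_chars : Int) (out : List String) : Prop := out = html_statement_windows_alt html anchors window_chars
instance (html : String) (anchors : List String) (window_chars : Int) (out : List String) : Decidable (Spec_html_statement_windows html anchors window_chars out) := by unfold Spec_html_statement_windows; infer_instance

-- ===== CLAIM (what is proved, stated in full; the proofs are below) =====
def Claim_equal_html_statement_windows : Prop := ∀ (html : String) (anchors : List String) (window_chars : Int), Dom_html_statement_windows html anchors window_chars → Spec_html_statement_windows html anchors window_chars (html_statement_windows html anchors window_chars)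

-- ===== LEMMAS AND PROOFS =====

-- phase 1, first component: only the key "" is ever inserted (always with value 0)
theorem pvPhase1_fst_get? (l : List String) (fb : PySem.Dict String Int × PySem.Dict Char (List String))
    (a : String) :
    ((l.foldl (fun fb a =>
        if a = "" then (fb.1.insert a 0, fb.2)
        else (fb.1, fb.2.modify (a.toList.headD ' ') [] (· ++ [a]))) fb).1).get? a
      = if a = "" ∧ "" ∈ l then some 0 else fb.1.get? a := by
  induction l generalizing fb with
  | nil => simp
  | cons b t ih =>
    simp only [List.foldl_cons]
    rw [ih]
    by_cases hb : b = ""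
    · subst hb
      by_cases ha : a = ""
      · subst ha
        by_cases ht : "" ∈ t <;> simp [ht, PySem.Dict.get?_insert_self]
      · simp only [ha, false_and, if_false, if_true]
        rw [PySem.Dict.get?_insert_of_ne _ _ ha]
    · simp [hb]

-- phase 1, second component: each bucket is the in-order list of nonempty anchors
-- whose first character is the bucket's key
theorem pvPhase1_snd_getD (l : List String) (fb : PySem.Dict String Int × PySem.Dict Char (List String))
    (c : Char) :
    ((l.foldl (fun fb a =>
        if a = "" then (fb.1.insert a 0, fb.2)
        else (fb.1, fb.2.modify (a.toList.headD ' ') [] (· ++ [a]))) fb).2).getD c []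
      = fb.2.getD c [] ++ l.filter (fun a => decide (a ≠ "" ∧ a.toList.headD ' ' = c)) := by
  induction l generalizing fb with
  | nil => simp
  | cons b t ih =>
    simp only [List.foldl_cons]
    rw [ih]
    by_cases hb : b = ""
    · simp [hb]
    · simp only [hb, if_false, List.filter_cons]
      rw [PySem.Dict.getD_modify]
      by_cases hc : b.toList.headD ' ' = c
      · simp only [List.headD_eq_head?_getD] at hc
        simp [hc, hb]
      · simp only [List.headD_eq_head?_getD] at hc ⊢
        rw [if_neg (fun h => hc h.symm)]
        simp [hc]

-- the inner bucket fold leaves keys outside the bucket untouched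
theorem pvInner_get?_of_not_mem (cl : List Char) (i : Nat) (l : List String)
    (f : PySem.Dict String Int) (a : String) (ha : a ∉ l) :
    ((l.foldl (pvBucketStep cl i) f).get? a) = f.get? a := by
  induction l generalizing f with
  | nil => rfl
  | cons b t ih =>
    simp only [List.foldl_cons]
    rw [ih _ (fun h => ha (List.mem_cons_of_mem _ h))]
    unfold pvBucketStep
    split
    · exact PySem.Dict.get?_insert_of_ne _ _ (fun h => ha (h ▸ List.mem_cons_self))
    · rfl

-- the inner bucket fold on a duplicate-free bucket: a key in the bucket gets position i
-- exactly when it is still unset and the anchor matches at i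
theorem pvInner_get?_of_mem (cl : List Char) (i : Nat) (l : List String)
    (f : PySem.Dict String Int) (a : String) (hnd : l.Nodup) (ha : a ∈ l) :
    ((l.foldl (pvBucketStep cl i) f).get? a)
      = if f.get? a = none ∧ PySem.Chars.startswith (cl.drop i) a.toList = true
        then some (i : Int) else f.get? a := by
  induction l generalizing f with
  | nil => cases ha
  | cons b t ih =>
    rcases List.nodup_cons.mp hnd with ⟨hbt, hnt⟩
    simp only [List.foldl_cons]
    rcases List.mem_cons.mp ha with hab | hat
    · subst hab
      rw [pvInner_get?_of_not_mem cl i t _ a hbt]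
      unfold pvBucketStep
      by_cases hg : (!f.contains a && PySem.Chars.startswith (cl.drop i) a.toList) = true
      · rw [if_pos hg, PySem.Dict.get?_insert_self]
        simp only [Bool.and_eq_true, Bool.not_eq_true'] at hg
        rw [if_pos ⟨(PySem.Dict.get?_eq_none_iff_contains f a).mpr hg.1, hg.2⟩]
      · rw [if_neg hg]
        simp only [Bool.and_eq_true, Bool.not_eq_true'] at hg
        rw [if_neg]
        intro ⟨h1, h2⟩
        exact hg ⟨(PySem.Dict.get?_eq_none_iff_contains f a).mp h1, h2⟩
    · have hab : a ≠ b := fun h => hbt (h ▸ hat)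
      have hstep : (pvBucketStep cl i f b).get? a = f.get? a := by
        unfold pvBucketStep
        split
        · exact PySem.Dict.get?_insert_of_ne _ _ hab
        · rfl
      rw [ih _ hnt hat, hstep]

-- the phase-2 sweep up to position m, named for the induction
def pvSweep (cl : List Char) (anchors : List String) (m : Nat) : PySem.Dict String Int :=
  (List.range m).foldl
    (fun first i =>
      (((pvPhase1 (PySem.List.dedup anchors)).2).getD (cl.getD i ' ') []).foldl
        (pvBucketStep cl i) first)
    (pvPhase1 (PySem.List.dedup anchors)).1

theorem pvSweep_empty (cl : List Char) (anchors : List String) (m : Nat)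
    (h : "" ∈ anchors) : (pvSweep cl anchors m).get? "" = some 0 := by
  induction m with
  | zero =>
    unfold pvSweep pvPhase1
    simp only [List.range_zero, List.foldl_nil]
    rw [pvPhase1_fst_get?]
    simp [h]
  | succ m ih =>
    unfold pvSweep
    rw [List.range_succ, List.foldl_append, List.foldl_cons, List.foldl_nil]
    rw [pvInner_get?_of_not_mem]
    · exact ih
    · intro hmem
      unfold pvPhase1 at hmem
      rw [pvPhase1_snd_getD] at hmem
      simp at hmem

-- invariant of the sweep for a nonempty anchor: its entry is the first position < m
-- where the lowered text matches it
theorem pvSweep_get? (cl : List Char) (anchors : List String) (a : String)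
    (ha : a ∈ anchors) (hne : a ≠ "") (m : Nat) (hm : m ≤ cl.length) :
    (pvSweep cl anchors m).get? a
      = ((List.range m).find?
          (fun i => PySem.Chars.startswith (cl.drop i) a.toList)).map (fun k => (k : Int)) := by
  have haD : a ∈ PySem.List.dedup anchors := (PySem.List.mem_dedup anchors a).mpr ha
  induction m with
  | zero =>
    unfold pvSweep pvPhase1
    simp only [List.range_zero, List.foldl_nil]
    rw [pvPhase1_fst_get?]
    simp [hne]
  | succ m ih =>
    have hm' : m ≤ cl.length := Nat.le_of_succ_le hm
    have hmlt : m < cl.length := hm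
    unfold pvSweep
    rw [List.range_succ, List.foldl_append, List.foldl_cons, List.foldl_nil]
    have hbucket : (((pvPhase1 (PySem.List.dedup anchors)).2).getD (cl.getD m ' ') [])
        = (PySem.List.dedup anchors).filter
            (fun x => decide (x ≠ "" ∧ x.toList.headD ' ' = cl.getD m ' ')) := by
      unfold pvPhase1
      rw [pvPhase1_snd_getD]
      simp
    have hfind : (((List.range m ++ [m])).find?
          (fun i => PySem.Chars.startswith (cl.drop i) a.toList)).map (fun k => (k : Int))
        = (((List.range m).find?
            (fun i => PySem.Chars.startswith (cl.drop i) a.toList)).map (fun k => (k : Int))).or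
          (if PySem.Chars.startswith (cl.drop m) a.toList then some (m : Int) else none) := by
      rw [List.find?_append]
      cases hfm : (List.range m).find? (fun i => PySem.Chars.startswith (cl.drop i) a.toList) with
      | some k => simp
      | none =>
        simp only [Option.none_or, List.find?]
        by_cases hp : PySem.Chars.startswith (cl.drop m) a.toList = true <;> simp [hp]
    rw [hfind, ← pvSweep, ← ih hm']
    by_cases hmem : a ∈ (((pvPhase1 (PySem.List.dedup anchors)).2).getD (cl.getD m ' ') [])
    · have hnd : ((((pvPhase1 (PySem.List.dedup anchors)).2).getD (cl.getD m ' ') [])).Nodup := by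
        rw [hbucket]; exact (PySem.List.nodup_dedup anchors).filter _
      rw [pvInner_get?_of_mem cl m _ _ a hnd hmem]
      cases hprev : (pvSweep cl anchors m).get? a with
      | some k => simp
      | none =>
        by_cases hp : PySem.Chars.startswith (cl.drop m) a.toList = true <;> simp [hp]
    · -- a is not in this bucket, so it cannot match at m either
      rw [pvInner_get?_of_not_mem cl m _ _ a hmem]
      have hnostart : PySem.Chars.startswith (cl.drop m) a.toList = false := by
        by_contra hx
        simp only [Bool.not_eq_false] at hx
        rcases (PySem.Chars.startswith_iff _ _).mp hx with ⟨u, hu⟩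
        obtain ⟨h, t, hht⟩ : ∃ h t, a.toList = h :: t := by
          cases hal : a.toList with
          | nil => exact absurd (String.toList_eq_nil_iff.mp hal) hne
          | cons h t => exact ⟨h, t, rfl⟩
        have hhead : (cl.drop m).head? = some h := by
          rw [← hu, hht]; rfl
        rw [List.head?_drop] at hhead
        apply hmem
        rw [hbucket, List.mem_filter]
        refine ⟨haD, by simp [hne, hht, hhead]⟩
      rw [hnostart]
      simp

-- after the full sweep, every anchor's entry is exactly Python's lo.find(a)
theorem pvSweep_find (cl : List Char) (anchors : List String) (a : String) (ha : a ∈ anchors) :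
    (pvSweep cl anchors cl.length).get? a
      = if PySem.Chars.find cl a.toList = -1 then none
        else some (PySem.Chars.find cl a.toList) := by
  by_cases hne : a = ""
  · subst hne
    rw [pvSweep_empty cl anchors cl.length ha]
    simp [PySem.Chars.find_nil]
  · rw [pvSweep_get? cl anchors a ha hne cl.length (Nat.le_refl _)]
    by_cases hf : PySem.Chars.find cl a.toList = -1
    · rw [if_pos hf]
      have hninf : ¬ a.toList <:+: cl := (PySem.Chars.find_eq_neg_one_iff cl a.toList).mp hf
      have : (List.range cl.length).find?
          (fun i => PySem.Chars.startswith (cl.drop i) a.toList) = none := by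
        rw [List.find?_eq_none]
        intro i _ hp
        exact hninf ((PySem.Chars.isIn_iff_infix _ _).mp
          ((PySem.Chars.exists_prefix_drop_iff_isIn a.toList cl).mp
            ⟨i, (PySem.Chars.startswith_iff _ _).mp hp⟩))
      rw [this]; rfl
    · rw [if_neg hf]
      have hpos : 0 ≤ PySem.Chars.find cl a.toList := by
        have := PySem.Chars.neg_one_le_find cl a.toList
        omega
      obtain ⟨hpre, hmin⟩ := PySem.Chars.find_spec hpos
      set k := (PySem.Chars.find cl a.toList).toNat with hk
      have hklt : k < cl.length := by
        rcases hpre with ⟨u, hu⟩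
        obtain ⟨h, t, hht⟩ : ∃ h t, a.toList = h :: t := by
          cases hal : a.toList with
          | nil => exact absurd (String.toList_eq_nil_iff.mp hal) hne
          | cons h t => exact ⟨h, t, rfl⟩
        have : cl.drop k ≠ [] := by rw [← hu, hht]; simp
        rw [ne_eq, List.drop_eq_nil_iff] at this
        omega
      have hfind : (List.range cl.length).find?
          (fun i => PySem.Chars.startswith (cl.drop i) a.toList) = some k := by
        apply List.find?_eq_some_iff_append.mpr
        refine ⟨(PySem.Chars.startswith_iff _ _).mpr hpre,
          List.range k, List.range' (k+1) (cl.length - (k+1)), ?_, ?_⟩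
        · rw [List.range_eq_range', show cl.length = k + (cl.length - k) from by omega,
              ← List.range'_append_1,
              show cl.length - k = (cl.length - (k+1)) + 1 from by omega,
              List.range'_succ]
          simp [List.range_eq_range']
          omega
        · intro x hx
          have hxk : x < k := List.mem_range.mp hx
          simp only [Bool.not_eq_true']
          rw [← Bool.not_eq_true]
          intro hp
          exact hmin x hxk ((PySem.Chars.startswith_iff _ _).mp hp)
      rw [hfind]
      simp [hk, Int.toNat_of_nonneg hpos]

-- ===== VERDICT (by name: the statement is the Claim_ definition above) =====
theorem html_statement_windows_spec : Claim_equal_html_statement_windows := by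
  intro html anchors window_chars _
  unfold Spec_html_statement_windows html_statement_windows html_statement_windows_alt
  simp only []
  rw [show ((List.range (PySem.Str.lower html).toList.length).foldl
      (fun first i =>
        (((pvPhase1 (PySem.List.dedup anchors)).2).getD ((PySem.Str.lower html).toList.getD i ' ') []).foldl
          (pvBucketStep (PySem.Str.lower html).toList i) first)
      (pvPhase1 (PySem.List.dedup anchors)).1)
    = pvSweep (PySem.Str.lower html).toList anchors (PySem.Str.lower html).toList.length from rfl]
  apply PySem.List.foldl_congr_mem
  intro ws a ha
  rw [pvSweep_find _ anchors a ha, PySem.Str.find_eq]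
  by_cases hf : PySem.Chars.find (PySem.Chars.lower html.toList) a.toList = -1 <;>
    simp [PySem.Str.toList_lower, hf]
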